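-- pv_equiv track=rewrite | github.com/cchristodoulaki/Pytheas | src/table_classifier_utilities.py | generate_train
-- ===== SOURCE A (Python) =====
-- import string
--
-- def generate_train(value, outlier_sensitive):
--     value_pattern = []
--     i = 0
--     while i < len(value):
--         if i < (len(value)) and value[i].isalpha():
--             letter_counter = 0
--             while i < (len(value)) and  value[i].isalpha():
--                 i += 1
--                 letter_counter += 1
--             value_pattern.append(['A', letter_counter])
--
--         elif i < (len(value)) and value[i].isspace():
--             space_counter = 0
--             while i < (len(value)) and  value[i].isspace():
--                 i += 1
--                 space_counter += 1
--             value_pattern.append(['S', space_counter])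
--
--         # ignore - if it is the first character followed by a digit
--         elif outlier_sensitive and i == 0 and len(value) > 1 and value[i] == '-' and value[i + 1].isdigit():
--             digit_counter = 0
--             i += 1
--             while i < (len(value)) and  value[i].isdigit():
--                 i += 1
--                 digit_counter += 1
--             value_pattern.append(['D', digit_counter])
--
--         elif i < (len(value)) and value[i].isdigit():
--             digit_counter = 0
--             while i < (len(value)) and  value[i].isdigit():
--                 i += 1
--                 digit_counter += 1
--             value_pattern.append(['D', digit_counter])
--
--         # Punctuation: !"#$%&'()*+,-./:;<=>?@[\]^_`{|}~
--         elif i < (len(value)) and value[i] in string.punctuation: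
--             punctuation_counter = 0
--             punctuation = value[i]
--             while i < (len(value)) and  value[i] == punctuation:
--                 i += 1
--                 punctuation_counter += 1
--             value_pattern.append([punctuation, punctuation_counter])
--
--         elif i < (len(value)):
--             unknown_counter = 0
--             unknown = value[i]
--             while i < (len(value)) and  value[i] == unknown:
--                 i += 1
--                 unknown_counter += 1
--             value_pattern.append([unknown, unknown_counter])
--
--         else:
--             i += 1
--
--     return value_pattern
-- ===== SOURCE B (Python) =====
-- def generate_train(value, outlier_sensitive):
--     def key(c):
--         if c.isalpha():
--             return 'A'
--         if c.isspace():
--             return 'S'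
--         if c.isdigit():
--             return 'D'
--         return c
--     # Stage 1: map every character to its class key.
--     ks = [key(c) for c in value]
--     n = len(ks)
--     # Stage 2: boundary indices where the key changes, plus the two ends.
--     bounds = [0] + [i for i in range(1, n) if ks[i] != ks[i - 1]] + [n]
--     # Stage 3: one group per consecutive pair of boundaries.
--     out = [[ks[a], b - a] for a, b in zip(bounds, bounds[1:]) if a < b]
--     # Outlier case: the first group is exactly ['-', 1]; A skips the '-'.
--     if outlier_sensitive and n > 1 and value[0] == '-' and value[1].isdigit():
--         out = out[1:]
--     return out
-- ===== Notes on version B (the rewrite author's own statement) =====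
-- stated objective: alternative
-- what changed: Replaces A's single-pass nested while/while scanner with a staged pipeline: map each char to its class key, compute the list of boundary indices where the key changes, and build one group per consecutive boundary pair by index arithmetic (the leading '-<digits>' outlier case becomes simply dropping the first group, which is always ['-',1] there).
import Mathlib
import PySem

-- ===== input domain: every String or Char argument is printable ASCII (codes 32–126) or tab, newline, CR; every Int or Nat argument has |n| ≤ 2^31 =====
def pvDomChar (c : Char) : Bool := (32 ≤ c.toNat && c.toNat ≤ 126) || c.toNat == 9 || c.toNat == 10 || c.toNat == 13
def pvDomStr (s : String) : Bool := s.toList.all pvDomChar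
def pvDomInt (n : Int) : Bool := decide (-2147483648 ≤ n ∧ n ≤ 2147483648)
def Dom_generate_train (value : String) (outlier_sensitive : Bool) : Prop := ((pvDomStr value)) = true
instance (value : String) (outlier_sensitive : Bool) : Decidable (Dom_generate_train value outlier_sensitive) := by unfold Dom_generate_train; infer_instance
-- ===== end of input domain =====

-- B replaces A's single-pass nested while/while scanner by a staged pipeline:
-- map chars to class keys, list the boundary indices where the key changes,
-- then build one group per consecutive boundary pair; same result.

-- ===== PORT A =====

-- inner 'while i < len(value) and pred(value[i]): i += 1; counter += 1' — returns the counter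
def pvRunA (cs : List Char) (p : Char → Bool) (i : Nat) : Nat :=
  if _h : i < cs.length then
    if p (cs.getD i ' ') then pvRunA cs p (i + 1) + 1 else 0
  else 0
termination_by cs.length - i
decreasing_by omega

-- string.punctuation
def pvPunct : List Char := "!\"#$%&'()*+,-./:;<=>?@[\\]^_`{|}~".toList

-- outer 'while i < len(value)' of A, fuel-bounded (each iteration advances i by ≥ 1)
def pvLoopA (cs : List Char) (outlier : Bool) : Nat → Nat → List (String × Int)
  | _, 0 => []
  | i, fuel + 1 =>
    if i < cs.length then
      let c := cs.getD i ' '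
      if PySem.Chars.isalpha c then
        let k := pvRunA cs PySem.Chars.isalpha i
        ("A", (k : Int)) :: pvLoopA cs outlier (i + k) fuel
      else if PySem.Chars.isspace c then
        let k := pvRunA cs PySem.Chars.isspace i
        ("S", (k : Int)) :: pvLoopA cs outlier (i + k) fuel
      else if outlier && i == 0 && decide (1 < cs.length) && (c == '-')
              && PySem.Chars.isdigit (cs.getD (i + 1) ' ') then
        let k := pvRunA cs PySem.Chars.isdigit (i + 1)
        ("D", (k : Int)) :: pvLoopA cs outlier (i + 1 + k) fuel
      else if PySem.Chars.isdigit c then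
        let k := pvRunA cs PySem.Chars.isdigit i
        ("D", (k : Int)) :: pvLoopA cs outlier (i + k) fuel
      else if pvPunct.contains c then
        let k := pvRunA cs (fun x => x == c) i
        (String.ofList [c], (k : Int)) :: pvLoopA cs outlier (i + k) fuel
      else
        let k := pvRunA cs (fun x => x == c) i
        (String.ofList [c], (k : Int)) :: pvLoopA cs outlier (i + k) fuel
    else []

def generate_train (value : String) (outlier_sensitive : Bool) : List (String × Int) :=
  pvLoopA value.toList outlier_sensitive 0 (value.toList.length + 1)

-- ===== PORT B =====

-- B's key: 'A' for alpha, 'S' for space, 'D' for digit, else the char itself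
def pvKey (c : Char) : Char :=
  if PySem.Chars.isalpha c then 'A'
  else if PySem.Chars.isspace c then 'S'
  else if PySem.Chars.isdigit c then 'D'
  else c

-- '[i for i in range(1, n) if ks[i] != ks[i-1]]' — the interior boundary indices
def pvIntr (ks : List Char) (n : Nat) : List Nat :=
  (List.range' 1 (n - 1)).filter (fun i => !(ks.getD i ' ' == ks.getD (i - 1) ' '))

-- '[[ks[a], b - a] for a, b in zip(bounds, bounds[1:]) if a < b]'
def pvProc (ks : List Char) (bnds : List Nat) : List (String × Int) :=
  ((bnds.zip bnds.tail).filter (fun p => decide (p.1 < p.2))).map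
    (fun p => (String.ofList [ks.getD p.1 ' '], ((p.2 - p.1 : Nat) : Int)))

-- stages 1–3 of Source B: keys, bounds ([0] + interior + [n]), groups
def pvOut (cs : List Char) : List (String × Int) :=
  pvProc (cs.map pvKey) (0 :: (pvIntr (cs.map pvKey) cs.length ++ [cs.length]))

def generate_train_alt (value : String) (outlier_sensitive : Bool) : List (String × Int) :=
  let cs := value.toList
  let out := pvOut cs
  if outlier_sensitive && decide (1 < cs.length) && (cs.getD 0 ' ' == '-')
      && PySem.Chars.isdigit (cs.getD 1 ' ') then out.drop 1 else out

-- ===== PRECONDITION & SPEC =====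
def Spec_generate_train (value : String) (outlier_sensitive : Bool) (out : List (String × Int)) : Prop := out = generate_train_alt value outlier_sensitive
instance (value : String) (outlier_sensitive : Bool) (out : List (String × Int)) : Decidable (Spec_generate_train value outlier_sensitive out) := by unfold Spec_generate_train; infer_instance

-- ===== CLAIM (what is proved, stated in full; the proofs are below) =====
def Claim_equal_generate_train : Prop := ∀ (value : String) (outlier_sensitive : Bool), Dom_generate_train value outlier_sensitive → Spec_generate_train value outlier_sensitive (generate_train value outlier_sensitive)

-- ===== LEMMAS AND PROOFS =====

-- the canonical run-length grouping, the bridge between both ports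
def pvGroups : List Char → List (String × Int)
  | [] => []
  | c :: rest =>
    let run := rest.takeWhile (fun x => pvKey x == pvKey c)
    (String.ofList [pvKey c], ((run.length + 1 : Nat) : Int)) :: pvGroups (rest.drop run.length)
termination_by l => l.length
decreasing_by simp

-- Python's char classes are mutually exclusive
theorem pv_alpha_not_space (x : Char) : PySem.Chars.isalpha x = true → PySem.Chars.isspace x = false := by
  have e1 : ('A').val.toNat = 65 := rfl
  have e2 : ('Z').val.toNat = 90 := rfl
  have e3 : ('a').val.toNat = 97 := rfl
  have e4 : ('z').val.toNat = 122 := rfl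
  simp only [PySem.Chars.isalpha, PySem.Chars.isupper, PySem.Chars.islower, PySem.Chars.isspace,
    Char.le_def, UInt32.le_iff_toNat_le, Char.toNat, Bool.or_eq_true, Bool.and_eq_true,
    decide_eq_true_eq, Bool.or_eq_false_iff, Bool.and_eq_false_iff, decide_eq_false_iff_not, not_le,
    e1, e2, e3, e4]
  omega

theorem pv_alpha_not_digit (x : Char) : PySem.Chars.isalpha x = true → PySem.Chars.isdigit x = false := by
  have e1 : ('A').val.toNat = 65 := rfl
  have e2 : ('Z').val.toNat = 90 := rfl
  have e3 : ('a').val.toNat = 97 := rfl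
  have e4 : ('z').val.toNat = 122 := rfl
  have e5 : ('0').val.toNat = 48 := rfl
  have e6 : ('9').val.toNat = 57 := rfl
  simp only [PySem.Chars.isalpha, PySem.Chars.isupper, PySem.Chars.islower, PySem.Chars.isdigit,
    Char.le_def, UInt32.le_iff_toNat_le, Bool.or_eq_true, Bool.and_eq_true,
    decide_eq_true_eq, Bool.and_eq_false_iff, decide_eq_false_iff_not, not_le,
    e1, e2, e3, e4, e5, e6]
  omega

theorem pv_space_not_digit (x : Char) : PySem.Chars.isspace x = true → PySem.Chars.isdigit x = false := by
  have e5 : ('0').val.toNat = 48 := rfl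
  have e6 : ('9').val.toNat = 57 := rfl
  simp only [PySem.Chars.isspace, PySem.Chars.isdigit, Char.le_def, UInt32.le_iff_toNat_le,
    Char.toNat, Bool.or_eq_true, Bool.and_eq_true,
    decide_eq_true_eq, Bool.and_eq_false_iff, decide_eq_false_iff_not, not_le, e5, e6]
  omega

-- A's inner while counts exactly the takeWhile run from position i
theorem pvRunA_eq (cs : List Char) (p : Char → Bool) (i : Nat) :
    pvRunA cs p i = ((cs.drop i).takeWhile p).length := by
  fun_induction pvRunA cs p i with
  | case1 i h hp ih =>
    rw [List.drop_eq_getElem_cons h, List.takeWhile_cons]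
    rw [List.getD_eq_getElem cs ' ' h] at hp
    simp [hp, ih]
  | case2 i h hp =>
    rw [List.drop_eq_getElem_cons h, List.takeWhile_cons]
    rw [List.getD_eq_getElem cs ' ' h] at hp
    simp [hp]
  | case3 i h =>
    rw [List.drop_eq_nil_of_le (by omega)]
    simp

theorem pvGroups_cons (c : Char) (rest : List Char) :
    pvGroups (c :: rest)
      = (String.ofList [pvKey c],
          (((rest.takeWhile (fun x => pvKey x == pvKey c)).length + 1 : Nat) : Int))
        :: pvGroups (rest.drop (rest.takeWhile (fun x => pvKey x == pvKey c)).length) := by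
  rw [pvGroups]

-- B's key agrees with A's branch predicate, pointwise, for each class of head char
theorem pvKey_alpha (c : Char) (h : PySem.Chars.isalpha c = true) :
    (fun x => pvKey x == pvKey c) = PySem.Chars.isalpha := by
  have hc : pvKey c = 'A' := by simp [pvKey, h]
  funext x
  rw [hc]
  by_cases hxa : PySem.Chars.isalpha x = true
  · simp [pvKey, hxa]
  · rw [Bool.not_eq_true] at hxa
    have hne : x ≠ 'A' := fun hh => by rw [hh] at hxa; exact absurd hxa (by decide)
    simp only [pvKey, hxa, Bool.false_eq_true, if_false]
    split_ifs <;> first | decide | simp [hne]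

theorem pvKey_space (c : Char) (ha : PySem.Chars.isalpha c = false)
    (h : PySem.Chars.isspace c = true) :
    (fun x => pvKey x == pvKey c) = PySem.Chars.isspace := by
  have hc : pvKey c = 'S' := by simp [pvKey, ha, h]
  funext x
  rw [hc]
  by_cases hxa : PySem.Chars.isalpha x = true
  · simp [pvKey, hxa, pv_alpha_not_space x hxa]
  · rw [Bool.not_eq_true] at hxa
    by_cases hxs : PySem.Chars.isspace x = true
    · simp [pvKey, hxa, hxs]
    · rw [Bool.not_eq_true] at hxs
      have hne : x ≠ 'S' := fun hh => by rw [hh] at hxa; exact absurd hxa (by decide)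
      simp only [pvKey, hxa, hxs, Bool.false_eq_true, if_false]
      split_ifs <;> first | decide | simp [hne]

theorem pvKey_digit (c : Char) (ha : PySem.Chars.isalpha c = false)
    (hs : PySem.Chars.isspace c = false) (h : PySem.Chars.isdigit c = true) :
    (fun x => pvKey x == pvKey c) = PySem.Chars.isdigit := by
  have hc : pvKey c = 'D' := by simp [pvKey, ha, hs, h]
  funext x
  rw [hc]
  by_cases hxa : PySem.Chars.isalpha x = true
  · simp [pvKey, hxa, pv_alpha_not_digit x hxa]
  · rw [Bool.not_eq_true] at hxa
    by_cases hxs : PySem.Chars.isspace x = true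
    · simp [pvKey, hxa, hxs, pv_space_not_digit x hxs]
    · rw [Bool.not_eq_true] at hxs
      by_cases hxd : PySem.Chars.isdigit x = true
      · simp [pvKey, hxa, hxs, hxd]
      · rw [Bool.not_eq_true] at hxd
        have hne : x ≠ 'D' := fun hh => by rw [hh] at hxa; exact absurd hxa (by decide)
        simp only [pvKey, hxa, hxs, hxd, Bool.false_eq_true, if_false]
        simp [hne]

theorem pvKey_other (c : Char) (ha : PySem.Chars.isalpha c = false)
    (hs : PySem.Chars.isspace c = false) (hd : PySem.Chars.isdigit c = false) :
    (fun x => pvKey x == pvKey c) = (fun x => x == c) := by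
  have hc : pvKey c = c := by simp [pvKey, ha, hs, hd]
  funext x
  rw [hc]
  by_cases hxa : PySem.Chars.isalpha x = true
  · have h1 : ('A' == c) = false := by
      simp only [beq_eq_false_iff_ne, ne_eq]
      intro hh; rw [← hh] at ha; exact absurd ha (by decide)
    have h2 : (x == c) = false := by
      simp only [beq_eq_false_iff_ne, ne_eq]
      intro hh; rw [hh] at hxa; rw [hxa] at ha; exact absurd ha (by decide)
    simp [pvKey, hxa, h1, h2]
  · rw [Bool.not_eq_true] at hxa
    by_cases hxs : PySem.Chars.isspace x = true
    · have h1 : ('S' == c) = false := by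
        simp only [beq_eq_false_iff_ne, ne_eq]
        intro hh; rw [← hh] at ha; exact absurd ha (by decide)
      have h2 : (x == c) = false := by
        simp only [beq_eq_false_iff_ne, ne_eq]
        intro hh; rw [hh] at hxs; rw [hxs] at hs; exact absurd hs (by decide)
      simp [pvKey, hxa, hxs, h1, h2]
    · rw [Bool.not_eq_true] at hxs
      by_cases hxd : PySem.Chars.isdigit x = true
      · have h1 : ('D' == c) = false := by
          simp only [beq_eq_false_iff_ne, ne_eq]
          intro hh; rw [← hh] at ha; exact absurd ha (by decide)
        have h2 : (x == c) = false := by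
          simp only [beq_eq_false_iff_ne, ne_eq]
          intro hh; rw [hh] at hxd; rw [hxd] at hd; exact absurd hd (by decide)
        simp [pvKey, hxa, hxs, hxd, h1, h2]
      · rw [Bool.not_eq_true] at hxd
        simp [pvKey, hxa, hxs, hxd]

-- the outlier test of both programs, at i = 0
def pvOutCond (cs : List Char) (outlier : Bool) : Bool :=
  outlier && decide (1 < cs.length) && (cs.getD 0 ' ' == '-')
    && PySem.Chars.isdigit (cs.getD 1 ' ')

-- the outer loop computes the grouping, as long as the outlier branch cannot fire
theorem pvLoopA_eq (cs : List Char) (outlier : Bool) :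
    ∀ fuel i, cs.length - i < fuel → (i = 0 → pvOutCond cs outlier = false) →
      pvLoopA cs outlier i fuel = pvGroups (cs.drop i) := by
  intro fuel
  induction fuel with
  | zero => omega
  | succ n ih =>
    intro i hf hi
    by_cases h : i < cs.length
    · have hc : cs.drop i = cs.getD i ' ' :: cs.drop (i + 1) := by
        rw [List.getD_eq_getElem cs ' ' h, List.drop_eq_getElem_cons h]
      set c := cs.getD i ' ' with hcdef
      have hout : (outlier && i == 0 && decide (1 < cs.length) && (c == '-')
          && PySem.Chars.isdigit (cs.getD (i + 1) ' ')) = false := by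
        by_cases hi0 : i = 0
        · subst hi0
          have := hi rfl
          rw [pvOutCond] at this
          simpa using this
        · have : (i == 0) = false := by simp [hi0]
          simp [this]
      have hdlen : (cs.drop (i + 1)).length = cs.length - (i + 1) := List.length_drop ..
      rw [pvLoopA, if_pos h]
      simp only [← hcdef, hout, Bool.false_eq_true, if_false]
      by_cases hA : PySem.Chars.isalpha c = true
      · rw [if_pos hA, hc, pvGroups_cons, pvKey_alpha c hA]
        have hk : pvRunA cs PySem.Chars.isalpha i
            = ((cs.drop (i + 1)).takeWhile PySem.Chars.isalpha).length + 1 := by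
          rw [pvRunA_eq, hc, List.takeWhile_cons, if_pos hA]; simp
        have hrun := (List.takeWhile_sublist (l := cs.drop (i + 1)) PySem.Chars.isalpha).length_le
        rw [hk]
        congr 1
        · simp [pvKey, hA]
        · rw [ih (i + (((cs.drop (i + 1)).takeWhile PySem.Chars.isalpha).length + 1))
            (by omega) (by intro h0; omega), List.drop_drop]
          congr 2
          omega
      · rw [if_neg hA]
        rw [Bool.not_eq_true] at hA
        by_cases hS : PySem.Chars.isspace c = true
        · rw [if_pos hS, hc, pvGroups_cons, pvKey_space c hA hS]
          have hk : pvRunA cs PySem.Chars.isspace i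
              = ((cs.drop (i + 1)).takeWhile PySem.Chars.isspace).length + 1 := by
            rw [pvRunA_eq, hc, List.takeWhile_cons, if_pos hS]; simp
          have hrun := (List.takeWhile_sublist (l := cs.drop (i + 1)) PySem.Chars.isspace).length_le
          rw [hk]
          congr 1
          · simp [pvKey, hA, hS]
          · rw [ih (i + (((cs.drop (i + 1)).takeWhile PySem.Chars.isspace).length + 1))
              (by omega) (by intro h0; omega), List.drop_drop]
            congr 2
            omega
        · rw [if_neg hS]
          rw [Bool.not_eq_true] at hS
          by_cases hD : PySem.Chars.isdigit c = true
          · rw [if_pos hD, hc, pvGroups_cons, pvKey_digit c hA hS hD]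
            have hk : pvRunA cs PySem.Chars.isdigit i
                = ((cs.drop (i + 1)).takeWhile PySem.Chars.isdigit).length + 1 := by
              rw [pvRunA_eq, hc, List.takeWhile_cons, if_pos hD]; simp
            have hrun := (List.takeWhile_sublist (l := cs.drop (i + 1)) PySem.Chars.isdigit).length_le
            rw [hk]
            congr 1
            · simp [pvKey, hA, hS, hD]
            · rw [ih (i + (((cs.drop (i + 1)).takeWhile PySem.Chars.isdigit).length + 1))
                (by omega) (by intro h0; omega), List.drop_drop]
              congr 2
              omega
          · rw [if_neg hD]
            rw [Bool.not_eq_true] at hD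
            have hk : pvRunA cs (fun x => x == c) i
                = ((cs.drop (i + 1)).takeWhile (fun x => x == c)).length + 1 := by
              rw [pvRunA_eq, hc, List.takeWhile_cons]; simp
            have hrun := (List.takeWhile_sublist (l := cs.drop (i + 1)) (fun x => x == c)).length_le
            have hgoal : (String.ofList [c], ((pvRunA cs (fun x => x == c) i : Nat) : Int))
                  :: pvLoopA cs outlier (i + pvRunA cs (fun x => x == c) i) n
                = pvGroups (cs.drop i) := by
              rw [hc, pvGroups_cons, pvKey_other c hA hS hD, hk]
              congr 1
              · simp [pvKey, hA, hS, hD]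
              · rw [ih (i + (((cs.drop (i + 1)).takeWhile (fun x => x == c)).length + 1))
                  (by omega) (by intro h0; omega), List.drop_drop]
                congr 2
                omega
            split_ifs <;> exact hgoal
    · rw [pvLoopA, if_neg h, List.drop_eq_nil_of_le (by omega), pvGroups]

-- ===== B-side lemmas: the boundary pipeline equals the grouping =====

-- every key in positions 0..run-length of c :: rest equals pvKey c
theorem pvKey_run_const (c : Char) (rest : List Char) (i : Nat)
    (hi : i ≤ (rest.takeWhile (fun x => pvKey x == pvKey c)).length) :
    ((c :: rest).map pvKey).getD i ' ' = pvKey c := by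
  have hlen := (List.takeWhile_sublist (l := rest) (p := fun x => pvKey x == pvKey c)).length_le
  match i with
  | 0 => simp
  | j + 1 =>
    have hjt : j < (rest.takeWhile (fun x => pvKey x == pvKey c)).length := by omega
    have hj : j < rest.length := by omega
    rw [List.getD_eq_getElem _ _ (by simp; omega)]
    simp only [List.getElem_map, List.getElem_cons_succ]
    have hmemtw := List.mem_takeWhile_imp (p := fun x => pvKey x == pvKey c)
      (List.getElem_mem hjt)
    have h3 := eq_of_beq hmemtw
    rw [List.IsPrefix.getElem (List.takeWhile_prefix _) hjt] at h3
    exact h3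

-- the element right after a takeWhile run fails the predicate
theorem pvTakeWhile_stop {α : Type} (p : α → Bool) (l : List α) (d : α)
    (h : (l.takeWhile p).length < l.length) : p (l.getD (l.takeWhile p).length d) = false := by
  induction l with
  | nil => simp at h
  | cons x t ih =>
    by_cases hp : p x = true
    · rw [List.takeWhile_cons_of_pos hp]
      simp only [List.length_cons, List.getD_cons_succ]
      exact ih (by simpa [List.takeWhile_cons_of_pos hp] using h)
    · rw [Bool.not_eq_true] at hp
      rw [List.takeWhile_cons_of_neg (by simp [hp])]
      simpa using hp

-- getD of the shifted key list
theorem pvKs_shift (cs : List Char) (s i : Nat) (h : s + i < cs.length) :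
    ((cs.drop s).map pvKey).getD i ' ' = (cs.map pvKey).getD (s + i) ' ' := by
  rw [List.getD_eq_getElem _ _ (by simp; omega), List.getD_eq_getElem _ _ (by simp; omega)]
  simp [List.getElem_drop]

-- range' shifted by a constant
theorem pvRange'_shift (s : Nat) : ∀ (q a : Nat), List.range' (a + s) q = (List.range' a q).map (· + s)
  | 0, _ => by simp
  | q + 1, a => by
    rw [List.range'_succ, List.range'_succ, List.map_cons,
      show a + s + 1 = (a + 1) + s by omega, pvRange'_shift s q (a + 1)]

-- structure of the interior boundary list of c :: rest
theorem pvIntr_cons (c : Char) (rest : List Char) :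
    pvIntr ((c :: rest).map pvKey) (rest.length + 1)
      = (if (rest.takeWhile (fun x => pvKey x == pvKey c)).length < rest.length
         then ((rest.takeWhile (fun x => pvKey x == pvKey c)).length + 1)
              :: (pvIntr ((rest.drop (rest.takeWhile (fun x => pvKey x == pvKey c)).length).map pvKey)
                    (rest.length - (rest.takeWhile (fun x => pvKey x == pvKey c)).length)).map
                   (· + ((rest.takeWhile (fun x => pvKey x == pvKey c)).length + 1))
         else []) := by
  have hlen := (List.takeWhile_sublist (l := rest) (p := fun x => pvKey x == pvKey c)).length_le
  set m := (rest.takeWhile (fun x => pvKey x == pvKey c)).length with hm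
  set ks := (c :: rest).map pvKey with hks
  have hrun : ∀ i ≤ m, ks.getD i ' ' = pvKey c := fun i hi => pvKey_run_const c rest i hi
  unfold pvIntr
  simp only [Nat.add_sub_cancel]
  by_cases hlt : m < rest.length
  · rw [if_pos hlt]
    have hsplit : List.range' 1 rest.length
        = List.range' 1 m ++ List.range' (1 + m) (rest.length - m) := by
      rw [List.range'_append_1]
      congr 1
      omega
    rw [hsplit, List.filter_append]
    have hfirst : (List.range' 1 m).filter (fun i => !(ks.getD i ' ' == ks.getD (i - 1) ' ')) = [] := by
      rw [List.filter_eq_nil_iff]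
      intro i hmem
      rw [List.mem_range'_1] at hmem
      rw [hrun i (by omega), hrun (i - 1) (by omega)]
      simp
    rw [hfirst, List.nil_append]
    have hq : rest.length - m = (rest.length - m - 1) + 1 := by omega
    rw [hq, show 1 + m = m + 1 by omega, List.range'_succ]
    rw [List.filter_cons]
    have hbound : (!(ks.getD (m + 1) ' ' == ks.getD (m + 1 - 1) ' ')) = true := by
      have h1 : ks.getD (m + 1) ' ' = pvKey (rest.getD m ' ') := by
        rw [List.getD_eq_getElem _ _ (by simp [hks]; omega), List.getD_eq_getElem _ _ (by omega)]
        simp [hks]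
      have h2 : ((fun x => pvKey x == pvKey c) (rest.getD m ' ')) = false :=
        pvTakeWhile_stop (fun x => pvKey x == pvKey c) rest ' ' hlt
      simp only [Nat.add_sub_cancel, hrun m (le_refl m), h1]
      simpa using h2
    rw [if_pos hbound]
    congr 1
    rw [show List.range' (m + 1 + 1) (rest.length - m - 1) = List.range' (1 + (m + 1)) (rest.length - m - 1) from by rw [show m + 1 + 1 = 1 + (m + 1) by omega], pvRange'_shift (m + 1) (rest.length - m - 1) 1, List.filter_map]
    have hcong : ∀ i ∈ List.range' 1 (rest.length - m - 1),
        ((fun i => !(ks.getD i ' ' == ks.getD (i - 1) ' ')) ∘ (· + (m + 1))) i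
          = (fun i => !(((rest.drop m).map pvKey).getD i ' '
              == ((rest.drop m).map pvKey).getD (i - 1) ' ')) i := by
      intro i hmem
      rw [List.mem_range'_1] at hmem
      have hdc : (c :: rest).drop (m + 1) = rest.drop m := by
        simp
      have e1 : ((rest.drop m).map pvKey).getD i ' ' = ks.getD (i + (m + 1)) ' ' := by
        rw [← hdc, pvKs_shift (c :: rest) (m + 1) i (by simp; omega), hks]
        congr 1
        omega
      have e2 : ((rest.drop m).map pvKey).getD (i - 1) ' ' = ks.getD (i + (m + 1) - 1) ' ' := by
        rw [← hdc, pvKs_shift (c :: rest) (m + 1) (i - 1) (by simp; omega), hks]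
        congr 1
        omega
      simp only [Function.comp_apply, e1, e2, Nat.add_sub_cancel]
    rw [List.filter_congr hcong]
    rfl
  · rw [if_neg hlt]
    have hmeq : m = rest.length := by omega
    rw [List.filter_eq_nil_iff]
    intro i hmem
    rw [List.mem_range'_1] at hmem
    rw [hrun i (by omega), hrun (i - 1) (by omega)]
    simp

-- every boundary index is at most n
theorem pvBnds_le (ks : List Char) (n a : Nat)
    (ha : a ∈ (0 :: (pvIntr ks n ++ [n]) : List Nat)) : a ≤ n := by
  unfold pvIntr at ha
  rcases List.mem_cons.mp ha with h0 | hrest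
  · omega
  rcases List.mem_append.mp hrest with hin | hlast
  · have := List.mem_range'_1.mp (List.mem_of_mem_filter hin)
    omega
  · have : a = n := by simpa using hlast
    omega

-- peeling one group off the pair pipeline
theorem pvProc_shift (ks ks' : List Char) (s n' : Nat) (t : List Nat) (hs : 1 ≤ s)
    (hb : ∀ a ∈ (0 :: t : List Nat), a ≤ n')
    (hshift : ∀ a < n', ks.getD (a + s) ' ' = ks'.getD a ' ') :
    pvProc ks (0 :: s :: t.map (· + s))
      = (String.ofList [ks.getD 0 ' '], (s : Int)) :: pvProc ks' (0 :: t) := by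
  unfold pvProc
  have hmap : (s :: t.map (· + s) : List Nat) = (0 :: t).map (· + s) := by simp
  simp only [List.tail_cons, List.zip_cons_cons, List.filter_cons]
  rw [if_pos (by simp; omega)]
  simp only [List.map_cons, Nat.sub_zero]
  congr 1
  rw [hmap, show ((0 :: t).map (· + s)).zip (t.map (· + s))
        = (((0 :: t).zip t).map (Prod.map (· + s) (· + s))) from by
      rw [← List.zip_map]]
  rw [show (((0 :: t).zip t).map (Prod.map (· + s) (· + s))).filter (fun p => decide (p.1 < p.2))
        = (((0 :: t).zip t).filter
            ((fun p => decide (p.1 < p.2)) ∘ (Prod.map (· + s) (· + s)))).map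
          (Prod.map (· + s) (· + s)) from List.filter_map]
  have hcongf : ((fun p : Nat × Nat => decide (p.1 < p.2)) ∘ (Prod.map (· + s) (· + s)))
      = (fun p : Nat × Nat => decide (p.1 < p.2)) := by
    funext p
    simp only [Function.comp_apply, Prod.map_apply]
    simp [decide_eq_decide]
  rw [hcongf, List.map_map]
  apply List.map_congr_left
  intro p hp
  obtain ⟨a, b⟩ := p
  rw [List.mem_filter] at hp
  obtain ⟨hpz, hplt⟩ := hp
  have hlt : a < b := by simpa using hplt
  have hmem := List.of_mem_zip hpz
  have hp2 : b ≤ n' := hb b (List.mem_cons_of_mem 0 hmem.2)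
  have hp1 : a < n' := by omega
  simp only [Function.comp_apply, Prod.map]
  rw [hshift a hp1]
  congr 1
  omega

theorem pvGroups_nil : pvGroups [] = [] := by rw [pvGroups]

-- the boundary pipeline equals the grouping
theorem pvOut_eq_groups (cs : List Char) : pvOut cs = pvGroups cs := by
  have key : ∀ N (cs : List Char), cs.length ≤ N → pvOut cs = pvGroups cs := by
    intro N
    induction N with
    | zero =>
      intro cs h
      have : cs = [] := List.length_eq_zero_iff.mp (by omega)
      subst this
      rw [pvGroups_nil]
      decide
    | succ N ih =>
      intro cs hlen
      match cs with
      | [] => rw [pvGroups_nil]; decide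
      | c :: rest =>
        have hlenc : (c :: rest).length = rest.length + 1 := by simp
        have hlr := (List.takeWhile_sublist (l := rest) (p := fun x => pvKey x == pvKey c)).length_le
        set m := (rest.takeWhile (fun x => pvKey x == pvKey c)).length with hm
        rw [pvGroups_cons]
        unfold pvOut
        rw [hlenc, pvIntr_cons, ← hm]
        by_cases hlt : m < rest.length
        · rw [if_pos hlt]
          have hn' : (rest.drop m).length = rest.length - m := by simp
          have happ : (pvIntr ((rest.drop m).map pvKey) (rest.length - m)).map (· + (m + 1))
                ++ [rest.length + 1]
              = ((pvIntr ((rest.drop m).map pvKey) (rest.length - m)) ++ [rest.length - m]).map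
                (· + (m + 1)) := by
            rw [List.map_append]
            congr 1
            simp
            omega
          rw [show ((0 : Nat) :: (((m + 1)
                :: (pvIntr ((rest.drop m).map pvKey) (rest.length - m)).map (· + (m + 1)))
                ++ [rest.length + 1]) : List Nat)
              = 0 :: (m + 1)
                :: ((pvIntr ((rest.drop m).map pvKey) (rest.length - m)).map (· + (m + 1))
                  ++ [rest.length + 1]) from rfl, happ]
          rw [pvProc_shift ((c :: rest).map pvKey) ((rest.drop m).map pvKey) (m + 1)
                (rest.length - m)
                (pvIntr ((rest.drop m).map pvKey) (rest.length - m) ++ [rest.length - m])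
                (by omega)
                (fun a ha => pvBnds_le _ _ a ha)
                (fun a ha => by
                  have hdc : (c :: rest).drop (m + 1) = rest.drop m := by simp
                  rw [← hdc, pvKs_shift (c :: rest) (m + 1) a (by simp; omega)]
                  congr 1
                  omega)]
          have htail : pvProc ((rest.drop m).map pvKey)
                (0 :: (pvIntr ((rest.drop m).map pvKey) (rest.length - m) ++ [rest.length - m]))
                = pvGroups (rest.drop m) := by
            have h1 : pvProc ((rest.drop m).map pvKey)
                (0 :: (pvIntr ((rest.drop m).map pvKey) (rest.length - m) ++ [rest.length - m]))
                = pvOut (rest.drop m) := by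
              unfold pvOut
              rw [hn']
            rw [h1]
            exact ih (rest.drop m) (by simp; omega)
          rw [htail]
          simp only [List.map_cons, List.getD_cons_zero]
        · rw [if_neg hlt]
          have hmeq : m = rest.length := by omega
          have hdone : rest.drop m = [] := by rw [hmeq]; simp
          rw [hdone, pvGroups_nil]
          unfold pvProc
          simp only [List.nil_append, List.tail_cons, List.zip_cons_cons, List.zip_nil_right,
            List.filter_cons]
          rw [if_pos (by simp)]
          simp only [List.filter_nil, List.map_cons, List.map_nil, Nat.sub_zero]
          simp only [List.getD_cons_zero]
          rw [hmeq]
  exact key cs.length cs le_rfl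

-- in the outlier case the first group is exactly ('-', 1)
theorem pvGroups_outlier (c1 : Char) (tl : List Char)
    (hdig : PySem.Chars.isdigit c1 = true) :
    (pvGroups ('-' :: c1 :: tl)).drop 1
      = ("D", ((((c1 :: tl).takeWhile PySem.Chars.isdigit).length : Nat) : Int))
        :: pvGroups ((c1 :: tl).drop ((c1 :: tl).takeWhile PySem.Chars.isdigit).length) := by
  have ha : PySem.Chars.isalpha c1 = false := by
    by_contra h
    rw [Bool.not_eq_false] at h
    rw [pv_alpha_not_digit c1 h] at hdig
    exact absurd hdig (by simp)
  have hs : PySem.Chars.isspace c1 = false := by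
    by_contra h
    rw [Bool.not_eq_false] at h
    rw [pv_space_not_digit c1 h] at hdig
    exact absurd hdig (by simp)
  have hk1 : pvKey c1 = 'D' := by simp [pvKey, ha, hs, hdig]
  have hkd : pvKey '-' = '-' := by decide
  have hrun0 : (c1 :: tl).takeWhile (fun x => pvKey x == pvKey '-') = [] := by
    rw [List.takeWhile_cons_of_neg]
    rw [hkd, hk1]
    decide
  rw [pvGroups_cons, hrun0]
  simp only [List.length_nil, List.drop_zero, List.drop_one]
  rw [pvGroups_cons, pvKey_digit c1 ha hs hdig, hk1, List.takeWhile_cons_of_pos hdig]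
  simp only [List.length_cons, List.tail_cons, List.drop_succ_cons]

-- ===== VERDICT (by name: the statement is the Claim_ definition above) =====
theorem generate_train_spec : Claim_equal_generate_train := by
  intro value outlier _
  unfold Spec_generate_train generate_train generate_train_alt
  set cs := value.toList with hcs
  by_cases hcond : pvOutCond cs outlier = true
  · have hcond' := hcond
    rw [pvOutCond] at hcond'
    simp only [Bool.and_eq_true, beq_iff_eq, decide_eq_true_eq] at hcond'
    obtain ⟨⟨⟨ho, hlen⟩, hdash⟩, hdig⟩ := hcond'
    have h0 : 0 < cs.length := by omega
    rw [pvLoopA, if_pos h0]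
    have hna : PySem.Chars.isalpha (cs.getD 0 ' ') = false := by rw [hdash]; decide
    have hns : PySem.Chars.isspace (cs.getD 0 ' ') = false := by rw [hdash]; decide
    have hbranch : (outlier && (0 : Nat) == 0 && decide (1 < cs.length)
        && (cs.getD 0 ' ' == '-') && PySem.Chars.isdigit (cs.getD (0 + 1) ' ')) = true := by
      simp only [Bool.and_eq_true, decide_eq_true_eq, beq_iff_eq]
      exact ⟨⟨⟨⟨ho, trivial⟩, hlen⟩, hdash⟩, hdig⟩
    simp only [hna, Bool.false_eq_true, if_false, hns, hbranch, if_true]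
    have halt : (outlier && decide (1 < cs.length) && (cs.getD 0 ' ' == '-')
        && PySem.Chars.isdigit (cs.getD 1 ' ')) = true := by
      simp only [Bool.and_eq_true, decide_eq_true_eq, beq_iff_eq]
      exact ⟨⟨⟨ho, hlen⟩, hdash⟩, hdig⟩
    rw [if_pos halt]
    -- destructure cs = '-' :: c1 :: tl
    match hcs2 : cs, hlen with
    | c0 :: c1 :: tl, _ =>
      have hc0 : c0 = '-' := by simpa using hdash
      have hc1 : PySem.Chars.isdigit c1 = true := by simpa using hdig
      subst hc0
      rw [pvOut_eq_groups, pvGroups_outlier c1 tl hc1]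
      have hk : pvRunA ('-' :: c1 :: tl) PySem.Chars.isdigit (0 + 1)
          = ((c1 :: tl).takeWhile PySem.Chars.isdigit).length := by
        rw [pvRunA_eq]
        simp
      rw [hk]
      have hrun := (List.takeWhile_sublist (l := c1 :: tl) (p := PySem.Chars.isdigit)).length_le
      congr 1
      rw [pvLoopA_eq ('-' :: c1 :: tl) outlier (('-' :: c1 :: tl).length)
        (0 + 1 + ((c1 :: tl).takeWhile PySem.Chars.isdigit).length)
        (by simp only [List.length_cons] at hrun ⊢; omega) (by omega),
        show 0 + 1 + ((c1 :: tl).takeWhile PySem.Chars.isdigit).length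
          = ((c1 :: tl).takeWhile PySem.Chars.isdigit).length + 1 by omega,
        List.drop_succ_cons]
  · rw [Bool.not_eq_true] at hcond
    have halt : (outlier && decide (1 < cs.length) && (cs.getD 0 ' ' == '-')
        && PySem.Chars.isdigit (cs.getD 1 ' ')) = false := by
      rw [pvOutCond] at hcond; exact hcond
    rw [if_neg (ne_true_of_eq_false halt)]
    rw [pvOut_eq_groups]
    have := pvLoopA_eq cs outlier (cs.length + 1) 0 (by omega) (fun _ => hcond)
    simpa using this
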